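-- pv_equiv track=rewrite | github.com/jmartinezgr/GestionClimatica | utilidades_usuarios.py | id_digit
-- ===== SOURCE A (Python) =====
-- def id_digit(valor: str) -> bool:
--     '''
--     Sinopsis
--     --------
--     Verifica si el valor dado es un dígito o es 'ND'.
--
--     Parameters
--     ----------
--     valor : str
--         Valor a verificar.
--
--     Returns
--     -------
--     bool
--         True si es un dígito o 'ND', False de lo contrario.
--     '''
--     if valor == 'ND':
--         return True
--
--     dot_count = 0
--     minus_count = 0
--
--     for i, char in enumerate(valor):
--         if char == '.':
--             dot_count += 1
--         elif char == '-':
--             # Verificar que el guión esté solo al inicio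
--             if i != 0:
--                 return False
--             minus_count += 1
--         elif not char.isdigit():
--             return False
--
--     # Verificar que haya máximo un punto y el guión solo esté al inicio
--     return dot_count <= 1 and minus_count <= 1
-- ===== SOURCE B (Python) =====
-- def id_digit(valor: str) -> bool:
--     '''Same check as A, decomposed into string-method passes instead of an
--     indexed counting loop.'''
--     if valor == 'ND':
--         return True
--     s = valor[1:] if valor.startswith('-') else valor
--     if s.count('.') > 1:
--         return False
--     t = s.replace('.', '')
--     return t == '' or t.isdigit()
-- ===== Notes on version B (the rewrite author's own statement) =====
-- stated objective: simpler
-- what changed: Replaces A's single indexed loop that counts dots/minuses and early-returns per character with a few whole-string method passes: strip one leading '-', reject more than one '.', drop the dot and test t == '' or t.isdigit().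
import Mathlib
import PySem

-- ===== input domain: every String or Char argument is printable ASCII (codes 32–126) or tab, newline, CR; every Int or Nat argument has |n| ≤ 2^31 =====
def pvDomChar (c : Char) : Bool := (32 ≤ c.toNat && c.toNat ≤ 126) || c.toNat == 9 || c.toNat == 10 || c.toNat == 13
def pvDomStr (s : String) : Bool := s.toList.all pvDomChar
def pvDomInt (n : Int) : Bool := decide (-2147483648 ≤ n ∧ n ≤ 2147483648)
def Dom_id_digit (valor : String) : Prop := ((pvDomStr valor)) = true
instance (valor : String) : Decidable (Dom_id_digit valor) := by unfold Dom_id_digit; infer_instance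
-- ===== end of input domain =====

-- B replaces A's indexed counting loop by a few whole-string passes (strip leading '-',
-- reject a second '.', drop the dot, isdigit test); objective: simpler decomposition, same cost.

-- ===== PORT A =====
-- the for-loop over enumerate(valor) with its two counters and early returns
def idDigitLoop : List Char → Nat → Nat → Nat → Bool
  | [], _, dot, minus => decide (dot ≤ 1) && decide (minus ≤ 1)
  | c :: rest, i, dot, minus =>
    if c = '.' then idDigitLoop rest (i + 1) (dot + 1) minus
    else if c = '-' then
      if i ≠ 0 then false
      else idDigitLoop rest (i + 1) dot (minus + 1)
    else if !(PySem.Chars.isdigit c) then false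
    else idDigitLoop rest (i + 1) dot minus

def id_digit (valor : String) : Bool :=
  if valor = "ND" then true
  else idDigitLoop valor.toList 0 0 0

-- ===== PORT B =====
def id_digit_alt (valor : String) : Bool :=
  if valor = "ND" then true
  else
    let s := if PySem.Str.startswith valor "-" then PySem.Str.slice valor (some 1) none else valor
    if 1 < PySem.Str.count s "." then false
    else
      let t := PySem.Str.replace s "." ""
      decide (t = "") || PySem.Str.strIsdigit t

-- ===== PRECONDITION & SPEC =====
def Spec_id_digit (valor : String) (out : Bool) : Prop := out = id_digit_alt valor
instance (valor : String) (out : Bool) : Decidable (Spec_id_digit valor out) := by unfold Spec_id_digit; infer_instance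

-- ===== CLAIM (what is proved, stated in full; the proofs are below) =====
def Claim_equal_id_digit : Prop := ∀ (valor : String), Dom_id_digit valor → Spec_id_digit valor (id_digit valor)

-- ===== LEMMAS AND PROOFS =====

-- 'good' characters: what A's loop accepts off position 0
def pvGood (c : Char) : Bool := decide (c = '.') || PySem.Chars.isdigit c

lemma count_go_dot (l : List Char) (fuel acc : Nat) (h : l.length ≤ fuel) :
    PySem.Chars.count.go ['.'] fuel l acc = acc + l.count '.' := by
  induction l generalizing fuel acc with
  | nil =>
    cases fuel <;> simp [PySem.Chars.count.go]
  | cons c t ih =>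
    cases fuel with
    | zero => simp at h
    | succ f =>
      simp only [List.length_cons, Nat.succ_le_succ_iff] at h
      by_cases hc : c = '.'
      · subst hc
        rw [PySem.Chars.count.go]
        simp only [List.isPrefixOf, BEq.rfl, Bool.true_and, if_pos]
        · simp only [show List.drop (['.'] : List Char).length ('.' :: t) = t from rfl]
          rw [ih f (acc + 1) (by simpa using h)]
          simp [List.count_cons]
          omega
      · rw [PySem.Chars.count.go]
        have hp : List.isPrefixOf ['.'] (c :: t) = false := by
          simp [List.isPrefixOf]
          exact fun h' => hc h'.symm
        rw [hp]
        simp only [Bool.false_eq_true, if_false]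
        rw [ih f acc h]
        simp [hc]

lemma count_dot (l : List Char) :
    PySem.Chars.count l ['.'] = l.count '.' := by
  simp [PySem.Chars.count, count_go_dot l l.length 0 le_rfl]

lemma replace_go_dot (l : List Char) (fuel : Nat) (acc : List Char) (h : l.length ≤ fuel) :
    PySem.Chars.replace.go ['.'] [] fuel l acc = acc.reverse ++ l.filter (fun c => !(c = '.')) := by
  induction l generalizing fuel acc with
  | nil => cases fuel <;> simp [PySem.Chars.replace.go]
  | cons c t ih =>
    cases fuel with
    | zero => simp at h
    | succ f =>
      simp only [List.length_cons, Nat.succ_le_succ_iff] at h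
      by_cases hc : c = '.'
      · subst hc
        rw [PySem.Chars.replace.go]
        simp only [List.isPrefixOf, BEq.rfl, Bool.true_and, if_pos]
        · simp only [show List.drop (['.'] : List Char).length ('.' :: t) = t from rfl]
          rw [ih f _ (by simpa using h)]
          simp
      · rw [PySem.Chars.replace.go]
        have : List.isPrefixOf ['.'] (c :: t) = false := by
          simp [List.isPrefixOf]
          exact fun h' => hc h'.symm
        rw [this]
        simp only [Bool.false_eq_true, if_false]
        rw [ih f _ h]
        simp [List.filter_cons, hc]

lemma replace_dot (l : List Char) :
    PySem.Chars.replace l ['.'] [] = l.filter (fun c => !(c = '.')) := by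
  simp [PySem.Chars.replace, replace_go_dot l l.length [] le_rfl]

-- 't == "" or t.isdigit()' is just 'all chars of t are digits'
lemma emp_or_isdigit (t : List Char) :
    (decide (t = []) || PySem.Chars.strIsdigit t) = t.all PySem.Chars.isdigit := by
  cases t <;> simp [PySem.Chars.strIsdigit]

-- the filtered isdigit test equals the per-character 'good' scan
lemma filter_all_digit (s : List Char) :
    (s.filter (fun c => !(c = '.'))).all PySem.Chars.isdigit = s.all pvGood := by
  induction s with
  | nil => simp
  | cons c t ih =>
    by_cases hc : c = '.'
    · subst hc; simpa [List.filter_cons, pvGood] using ih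
    · simp [List.filter_cons, hc, pvGood, ih]

-- A's loop, once past position 0, is a pure 'all good' scan plus the dot budget
lemma loop_char (rest : List Char) (j dot minus : Nat) :
    idDigitLoop rest (j + 1) dot minus =
      (rest.all pvGood && decide (dot + rest.count '.' ≤ 1) && decide (minus ≤ 1)) := by
  induction rest generalizing j dot with
  | nil => simp [idDigitLoop]
  | cons c t ih =>
    by_cases hc : c = '.'
    · subst hc
      simp only [idDigitLoop, if_pos rfl]
      rw [ih (j + 1)]
      have : dot + 1 + List.count '.' t = dot + (List.count '.' t + 1) := by omega
      simp [pvGood, List.count_cons, this]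
    · by_cases hm : c = '-'
      · subst hm
        simp only [idDigitLoop]
        norm_num
        simp [pvGood, PySem.Chars.isdigit]
      · by_cases hd : PySem.Chars.isdigit c
        · simp only [idDigitLoop, if_neg hc, if_neg hm, hd]
          simp only [Bool.not_true, Bool.false_eq_true, if_false]
          rw [ih (j + 1)]
          simp [pvGood, hd, hc]
        · simp [idDigitLoop, hc, hm, hd, pvGood]

-- A's whole loop equals the strip-minus-then-scan form B uses
lemma a_char (cs : List Char) :
    idDigitLoop cs 0 0 0 =
      ((if List.isPrefixOf ['-'] cs then cs.tail else cs).all pvGood &&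
        decide ((if List.isPrefixOf ['-'] cs then cs.tail else cs).count '.' ≤ 1)) := by
  cases cs with
  | nil => simp [idDigitLoop]
  | cons c rest =>
    by_cases hm : c = '-'
    · subst hm
      have hpre : List.isPrefixOf ['-'] ('-' :: rest) = true := by simp [List.isPrefixOf]
      simp only [hpre, if_true, List.tail_cons]
      have : ¬ ('-' : Char) = '.' := by decide
      simp only [idDigitLoop, if_neg this, if_pos rfl]
      norm_num
      rw [loop_char rest 0 0 1]
      simp
    · have hpre : List.isPrefixOf ['-'] (c :: rest) = false := by
        simp [List.isPrefixOf]
        exact fun h' => hm h'.symm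
      simp only [hpre, Bool.false_eq_true, if_false]
      by_cases hc : c = '.'
      · subst hc
        simp only [idDigitLoop, if_pos rfl]
        rw [loop_char rest 0 1 0]
        have : 1 + List.count '.' rest = List.count '.' rest + 1 := by omega
        simp [pvGood, List.count_cons, this]
      · by_cases hd : PySem.Chars.isdigit c
        · simp only [idDigitLoop, if_neg hc, if_neg hm, hd, Bool.not_true,
            Bool.false_eq_true, if_false]
          rw [loop_char rest 0 0 0]
          simp [pvGood, hd, hc]
        · simp [idDigitLoop, hc, hm, hd, pvGood]

-- ===== VERDICT (by name: the statement is the Claim_ definition above) =====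
theorem id_digit_spec : Claim_equal_id_digit := by
  intro valor _
  unfold Spec_id_digit id_digit id_digit_alt
  by_cases hnd : valor = "ND"
  · simp [hnd]
  · simp only [hnd, if_false]
    rw [a_char valor.toList]
    -- bridge B's Str calls down to List Char
    rw [PySem.Str.startswith_eq]
    have hdash : ("-" : String).toList = ['-'] := by decide
    have hdot : ("." : String).toList = ['.'] := by decide
    rw [hdash]
    simp only [PySem.Chars.startswith]
    by_cases hpre : List.isPrefixOf ['-'] valor.toList
    · simp only [hpre, if_true]
      have hs : (PySem.Str.slice valor (some 1) none).toList = valor.toList.tail := by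
        rw [PySem.Str.toList_slice]
        simp [PySem.Chars.slice, PySem.List.slice_from_one]
      have hcount : PySem.Str.count (PySem.Str.slice valor (some 1) none) "." =
          valor.toList.tail.count '.' := by
        simp only [PySem.Str.count, hs, hdot, count_dot]
      rw [hcount]
      by_cases hc1 : 1 < valor.toList.tail.count '.'
      · simp only [hc1, if_true]
        have : ¬ (valor.toList.tail.count '.' ≤ 1) := by omega
        simp [this]
      · simp only [hc1, if_false]
        have ht : (PySem.Str.replace (PySem.Str.slice valor (some 1) none) "." "").toList =
            valor.toList.tail.filter (fun c => !(c = '.')) := by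
          rw [PySem.Str.toList_replace, hs, hdot]
          have : ("" : String).toList = [] := by decide
          rw [this, replace_dot]
        have hemp : (PySem.Str.replace (PySem.Str.slice valor (some 1) none) "." "" = "") ↔
            valor.toList.tail.filter (fun c => !(c = '.')) = [] := by
          rw [← String.toList_eq_nil_iff, ht]
        rw [PySem.Str.strIsdigit_eq, ht]
        have hle : valor.toList.tail.count '.' ≤ 1 := by omega
        simp only [hle, decide_true, Bool.and_true]
        rw [show (decide (PySem.Str.replace (PySem.Str.slice valor (some 1) none) "." "" = "") : Bool)
              = decide (valor.toList.tail.filter (fun c => !(c = '.')) = []) from by simp [hemp]]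
        rw [emp_or_isdigit, filter_all_digit]
    · simp only [hpre, Bool.false_eq_true, if_false]
      have hcount : PySem.Str.count valor "." = valor.toList.count '.' := by
        simp only [PySem.Str.count, hdot, count_dot]
      rw [hcount]
      by_cases hc1 : 1 < valor.toList.count '.'
      · simp only [hc1, if_true]
        have : ¬ (valor.toList.count '.' ≤ 1) := by omega
        simp [this]
      · simp only [hc1, if_false]
        have ht : (PySem.Str.replace valor "." "").toList =
            valor.toList.filter (fun c => !(c = '.')) := by
          rw [PySem.Str.toList_replace, hdot]
          have : ("" : String).toList = [] := by decide
          rw [this, replace_dot]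
        have hemp : (PySem.Str.replace valor "." "" = "") ↔
            valor.toList.filter (fun c => !(c = '.')) = [] := by
          rw [← String.toList_eq_nil_iff, ht]
        rw [PySem.Str.strIsdigit_eq, ht]
        have hle : valor.toList.count '.' ≤ 1 := by omega
        simp only [hle, decide_true, Bool.and_true]
        rw [show (decide (PySem.Str.replace valor "." "" = "") : Bool)
              = decide (valor.toList.filter (fun c => !(c = '.')) = []) from by simp [hemp]]
        rw [emp_or_isdigit, filter_all_digit]
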